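-- pv_equiv track=rewrite | github.com/Luodian/GO_Kitti | third_tools/Test/seq_test.py | extract_mAP
-- ===== SOURCE A (Python) =====
-- def extract_mAP(line):
--     ret = ""
--     for i in range(len(line)):
--         if line[i] is not " ":
--             for j in range(i, len(line)):
--                 if line[j] is not " ":
--                     ret += line[j]
--                 else:
--                     return ret
-- ===== SOURCE B (Python) =====
-- def extract_mAP(line):
--     stripped = line.lstrip(' ')
--     space = stripped.find(' ')
--     if space == -1:
--         return None
--     return stripped[:space]
-- ===== Notes on version B (the rewrite author's own statement) =====
-- stated objective: idiomatic
-- what changed: Replaced the nested index loops with incremental string concatenation by string-primitive scanning: lstrip(' ') then find(' ') and one slice; Pre_ excludes inputs with no space-terminated first token (empty, all-space, or token running to end of string), where A returns None instead of a str (B also returns None there).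
-- outside the precondition, e.g. on extract_mAP('abc'): A returns None, B returns None; on extract_mAP(' '): A returns None, B returns None; on extract_mAP('   '): A returns None, B returns None
import Mathlib
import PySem

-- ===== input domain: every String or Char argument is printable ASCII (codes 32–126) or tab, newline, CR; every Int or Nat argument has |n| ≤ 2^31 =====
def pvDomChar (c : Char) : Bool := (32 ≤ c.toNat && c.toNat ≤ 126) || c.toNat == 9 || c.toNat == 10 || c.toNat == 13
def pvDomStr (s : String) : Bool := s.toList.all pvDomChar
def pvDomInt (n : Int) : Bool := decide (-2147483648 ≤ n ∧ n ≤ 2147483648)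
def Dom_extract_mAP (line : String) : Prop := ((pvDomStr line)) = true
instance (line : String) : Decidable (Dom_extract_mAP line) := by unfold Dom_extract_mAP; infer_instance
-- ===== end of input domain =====

-- B replaces A's nested character loops and incremental concatenation with string-primitive
-- scanning (lstrip, find, one slice); idiomatic, same O(n) cost. Return-value equivalence only.

-- ===== PORT A =====
-- inner loop 'for j in range(i, len(line))': accumulates ret; (some r, _) = early 'return ret'
def pvInnerA : List Char → String → Option String × String
  | [], ret => (none, ret)
  | c :: t, ret => if c ≠ ' ' then pvInnerA t (ret.push c) else (some ret, ret)

-- outer loop 'for i in range(len(line))' over the suffix starting at i; ret persists across iterations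
def pvOuterA : List Char → String → Option String
  | [], _ => none
  | c :: t, ret =>
    if c ≠ ' ' then
      match pvInnerA (c :: t) ret with
      | (some r, _) => some r
      | (none, ret') => pvOuterA t ret'
    else pvOuterA t ret

def extract_mAP (line : String) : String :=
  -- Python returns None when both loops finish; those inputs are excluded by Pre_ ("" stands in)
  (pvOuterA line.toList "").getD ""

-- ===== PORT B =====
def extract_mAP_alt (line : String) : String :=
  -- stripped = line.lstrip(' '): hand port, exact — drop leading space characters only
  let stripped := line.toList.dropWhile (fun c => c == ' ')
  let space := PySem.Chars.find stripped [' ']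
  if space = -1 then ""  -- Python B returns None here; excluded by Pre_
  else String.ofList (PySem.List.slice stripped none (some space))

-- ===== PRECONDITION & SPEC =====
-- Pre_ excludes exactly the inputs with no space-terminated first token (empty, all spaces,
-- or first token running to end of string), where both Pythons return None — not a str.
def Pre_extract_mAP (line : String) : Prop :=
  ' ' ∈ line.toList.dropWhile (fun c => c == ' ')
instance (line : String) : Decidable (Pre_extract_mAP line) := by
  unfold Pre_extract_mAP; infer_instance

def pvWitness_extract_mAP : String := " abc def"

def Spec_extract_mAP (line : String) (out : String) : Prop := out = extract_mAP_alt line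
instance (line : String) (out : String) : Decidable (Spec_extract_mAP line out) := by
  unfold Spec_extract_mAP; infer_instance

-- ===== CLAIM (what is proved, stated in full; the proofs are below) =====
def Claim_equal_extract_mAP : Prop :=
  ∀ (line : String), Dom_extract_mAP line → Pre_extract_mAP line →
    Spec_extract_mAP line (extract_mAP line)

-- ===== LEMMAS AND PROOFS =====

-- the inner loop hits a space: it returns ret ++ the chars before the first space
theorem pvInnerA_of_mem (l : List Char) (ret : String) (h : ' ' ∈ l) :
    (pvInnerA l ret).1 =
      some (String.ofList (ret.toList ++ l.takeWhile (fun c => !(c == ' ')))) := by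
  induction l generalizing ret with
  | nil => cases h
  | cons c t ih =>
    by_cases hc : c = ' '
    · subst hc
      simp [pvInnerA]
    · have ht : ' ' ∈ t := by
        rcases List.mem_cons.mp h with h' | h'
        · exact absurd h'.symm hc
        · exact h'
      simp only [pvInnerA, hc, ne_eq, not_false_eq_true, if_true, ih _ ht,
        List.takeWhile_cons, show (c == ' ') = false by simp [hc], Bool.not_false]
      rw [String.toList_push]
      simp

-- the outer loop: skip leading spaces, then the inner loop finishes the job
theorem pvOuterA_spec (l : List Char) (ret : String)
    (h : ' ' ∈ l.dropWhile (fun c => c == ' ')) :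
    pvOuterA l ret =
      some (String.ofList
        (ret.toList ++ (l.dropWhile (fun c => c == ' ')).takeWhile (fun c => !(c == ' ')))) := by
  induction l generalizing ret with
  | nil => simp at h
  | cons c t ih =>
    by_cases hc : c = ' '
    · subst hc
      simp only [List.dropWhile_cons, beq_self_eq_true, if_true] at h ⊢
      simpa [pvOuterA] using ih ret h
    · have hd : (c :: t).dropWhile (fun c => c == ' ') = c :: t := by
        simp [hc]
      rw [hd] at h
      rw [show (c :: t).dropWhile (fun c => c == ' ') = c :: t from hd]
      simp only [pvOuterA, hc, ne_eq, not_false_eq_true, if_true]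
      have h1 := pvInnerA_of_mem (c :: t) ret h
      rcases hinner : pvInnerA (c :: t) ret with ⟨o, r⟩
      rw [hinner] at h1
      simp at h1
      simp [h1]

-- [a] is a prefix of t iff t starts with a
theorem singleton_prefix_iff {α : Type} (a : α) (t : List α) :
    [a] <+: t ↔ t.head? = some a := by
  cases t with
  | nil => simp
  | cons b s =>
    constructor
    · rintro ⟨u, hu⟩
      simp only [List.singleton_append, List.cons.injEq] at hu
      simp [hu.1]
    · intro h
      simp only [List.head?_cons, Option.some.injEq] at h
      exact ⟨s, by simp [h]⟩

-- take up to the first index holding p equals takeWhile (!p)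
theorem take_eq_takeWhile (l : List Char) (n : Nat)
    (h1 : l[n]? = some ' ') (h2 : ∀ i, i < n → ¬ l[i]? = some ' ') :
    l.take n = l.takeWhile (fun c => !(c == ' ')) := by
  induction l generalizing n with
  | nil => simp at h1
  | cons c t ih =>
    cases n with
    | zero =>
      simp only [List.getElem?_cons_zero, Option.some.injEq] at h1
      simp [h1]
    | succ m =>
      have hc : ¬ c = ' ' := by
        have := h2 0 (Nat.succ_pos m)
        simpa using this
      simp only [List.getElem?_cons_succ] at h1
      have h2' : ∀ i, i < m → ¬ t[i]? = some ' ' := by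
        intro i hi
        have := h2 (i + 1) (Nat.succ_lt_succ hi)
        simpa using this
      simp [List.take_succ_cons, hc, ih m h1 h2']

-- ===== VERDICT (by name: the statement is the Claim_ definition above) =====
theorem extract_mAP_spec : Claim_equal_extract_mAP := by
  intro line _ hpre
  unfold Spec_extract_mAP extract_mAP extract_mAP_alt
  set s := line.toList.dropWhile (fun c => c == ' ') with hs
  have hmem : ' ' ∈ s := hpre
  -- A's value
  rw [pvOuterA_spec _ _ hmem]
  -- B's value: find is nonneg since [' '] is an infix of s
  have hinf : [' '] <:+: s := by
    obtain ⟨pre, suf, hps⟩ := List.append_of_mem hmem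
    exact ⟨pre, suf, by simp [hps]⟩
  have hnn : 0 ≤ PySem.Chars.find s [' '] := (PySem.Chars.find_nonneg_iff s [' ']).mpr hinf
  have hne : ¬ PySem.Chars.find s [' '] = -1 := by omega
  simp only [hne, if_false]
  obtain ⟨hpref, hmin⟩ := PySem.Chars.find_spec (s := s) (sub := [' ']) hnn
  set n := (PySem.Chars.find s [' ']).toNat with hn
  have h1 : s[n]? = some ' ' := by
    have := (singleton_prefix_iff ' ' (s.drop n)).mp hpref
    rwa [List.head?_drop] at this
  have h2 : ∀ i, i < n → ¬ s[i]? = some ' ' := by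
    intro i hi hcontra
    exact hmin i hi ((singleton_prefix_iff ' ' (s.drop i)).mpr (by rwa [List.head?_drop]))
  rw [PySem.List.slice_to _ hnn]
  simp only [Option.getD_some]
  rw [take_eq_takeWhile s n h1 h2, ← hs]
  simp
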